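-- pv_equiv track=rewrite | github.com/Angela-Park-JE/TIL_ver1 | python3/algorithm_programmers/_008_최빈값구하기.py | solution
-- ===== SOURCE A (Python) =====
-- def solution(array):
--     answer = 0
--     dic_cnts = {}
--     for i in array:
--         dic_cnts[i] = array.count(i)
--     cnts = list(dic_cnts.values())
--     cnts.sort()
--     if len(cnts) == 1:
--         answer = max(cnts)
--     elif cnts.count(max(cnts)) > 1:
--         answer = -1
--     else:
--         answer = max(cnts)
--     return answer
-- ===== SOURCE B (Python) =====
-- def solution(array):
--     # sort, then one run-length pass; tie for the longest run -> -1
--     s = sorted(array)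
--     lengths = []
--     run = 0
--     prev = None
--     for x in s:
--         if run and x == prev:
--             run += 1
--         else:
--             if run:
--                 lengths.append(run)
--             run = 1
--             prev = x
--     if run:
--         lengths.append(run)
--     m = max(lengths)  # ValueError on empty input, like A
--     return -1 if lengths.count(m) > 1 else m
-- ===== Notes on version B (the rewrite author's own statement) =====
-- stated objective: faster
-- what changed: B replaces A's dict built with a quadratic array.count(i) per element (plus sorting the value list) by sorting the array once and measuring run lengths of equal consecutive elements in a single pass, detecting a tie by counting how many runs reach the maximal length.
import Mathlib
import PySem

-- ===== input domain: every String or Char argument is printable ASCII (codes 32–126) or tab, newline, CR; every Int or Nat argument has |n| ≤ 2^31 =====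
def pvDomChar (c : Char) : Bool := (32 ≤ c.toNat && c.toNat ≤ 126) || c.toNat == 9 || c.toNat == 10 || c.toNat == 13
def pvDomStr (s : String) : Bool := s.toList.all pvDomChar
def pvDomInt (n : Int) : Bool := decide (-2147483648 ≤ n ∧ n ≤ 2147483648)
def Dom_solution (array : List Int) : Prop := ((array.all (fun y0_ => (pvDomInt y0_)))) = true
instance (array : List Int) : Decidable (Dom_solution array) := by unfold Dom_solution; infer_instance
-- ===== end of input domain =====

-- B sorts the array and does one run-length pass instead of building a count dict with a
-- quadratic array.count per element; return values are identical on nonempty arrays.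

-- ===== PORT A =====
-- for i in array: dic_cnts[i] = array.count(i)
-- cnts = sorted(dic_cnts.values()); then the three-way branch on len/count of max
def solution (array : List Int) : Int :=
  let dic_cnts : PySem.Dict Int Int :=
    array.foldl (fun d i => d.insert i ((PySem.List.count array i : Nat) : Int)) PySem.Dict.empty
  let cnts := PySem.List.sorted (PySem.Dict.values dic_cnts) (fun x => x)
  if cnts.length = 1 then (PySem.List.max? cnts (fun x => x)).getD 0
  else if PySem.List.count cnts ((PySem.List.max? cnts (fun x => x)).getD 0) > 1 then -1
  else (PySem.List.max? cnts (fun x => x)).getD 0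

-- ===== PORT B =====
-- the run-length loop of Source B: `run` counts the current block of equal elements (prev),
-- a finished block's length is emitted when a different element starts and at the end
def runLengths : List Int → Int → Int → List Int
  | [], _, run => [run]
  | x :: xs, prev, run =>
      if x = prev then runLengths xs prev (run + 1) else run :: runLengths xs x 1

-- lengths of the maximal blocks of equal consecutive elements (Source B's `lengths`)
def runs : List Int → List Int
  | [] => []
  | x :: xs => runLengths xs x 1

def solution_alt (array : List Int) : Int :=
  let lengths := runs (PySem.List.sorted array (fun x => x))
  match PySem.List.max? lengths (fun y => y) with
  | none => 0   -- unreachable under Pre_: max([]) raises in both programs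
  | some m => if PySem.List.count lengths m > 1 then -1 else m

-- ===== PRECONDITION & SPEC =====
-- On the empty list both A and B raise ValueError (max of an empty sequence); excluded.
def Pre_solution (array : List Int) : Prop := array ≠ []
instance (array : List Int) : Decidable (Pre_solution array) := by unfold Pre_solution; infer_instance
def pvWitness_solution : List Int := [1, 2, 2]

def Spec_solution (array : List Int) (out : Int) : Prop := out = solution_alt array
instance (array : List Int) (out : Int) : Decidable (Spec_solution array out) := by unfold Spec_solution; infer_instance

-- ===== CLAIM (what is proved, stated in full; the proofs are below) =====
def Claim_equal_solution : Prop := ∀ (array : List Int), Dom_solution array → Pre_solution array → Spec_solution array (solution array)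

-- ===== LEMMAS AND PROOFS =====

-- the value stored for key k by A's loop (the inserted value depends only on the key)
theorem getD_foldl_insert_fun (f : Int → Int) (l : List Int) (d : PySem.Dict Int Int) (k : Int) :
    (l.foldl (fun d i => d.insert i (f i)) d).getD k 0
      = if k ∈ l then f k else d.getD k 0 := by
  induction l generalizing d with
  | nil => simp
  | cons a t ih =>
      simp only [List.foldl_cons, ih, PySem.Dict.getD_insert, List.mem_cons]
      by_cases hkt : k ∈ t <;> by_cases hka : k = a <;> simp [hkt, hka]

-- A's dict values are the counts of the distinct elements in first-occurrence order
theorem values_foldl_insert_count (array : List Int) :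
    (array.foldl (fun d i => d.insert i ((PySem.List.count array i : Nat) : Int)) PySem.Dict.empty).values
      = (PySem.Set.ofList array).map (fun k => ((List.count k array : Nat) : Int)) := by
  set F := array.foldl (fun d i => d.insert i ((PySem.List.count array i : Nat) : Int)) PySem.Dict.empty with hF
  have hkeys : F.keys = PySem.Set.ofList array := by
    rw [hF, PySem.Dict.keys_foldl_insert array (fun _ i => ((PySem.List.count array i : Nat) : Int)),
      PySem.Dict.keys_empty, PySem.Set.update_nil_left]
  have hnd : F.keys.Nodup := by rw [hkeys]; exact PySem.Set.nodup_ofList array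
  rw [PySem.Dict.values_eq_map_keys F hnd 0, hkeys]
  refine List.map_congr_left (fun k hk => ?_)
  have hk' : k ∈ array := (PySem.Set.mem_ofList array k).mp hk
  rw [hF, getD_foldl_insert_fun, if_pos hk', PySem.List.count_eq]

-- the run-length helper on a sorted tail: head block, then the runs of the rest
theorem runLengths_spec (xs : List Int) (prev run : Int)
    (hs : xs.Pairwise (· ≤ ·)) (hlb : ∀ y ∈ xs, prev ≤ y) :
    runLengths xs prev run
      = (run + (List.count prev xs : Nat)) :: runs (xs.filter (fun y => y ≠ prev)) := by
  induction xs generalizing run with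
  | nil => simp [runLengths, runs]
  | cons y t ih =>
      rcases List.pairwise_cons.mp hs with ⟨hy, ht⟩
      by_cases hyp : y = prev
      · subst hyp
        rw [runLengths, if_pos rfl, ih (run + 1) ht (fun z hz => hlb z (List.mem_cons_of_mem y hz))]
        simp
        ring_nf
      · have hprevy : prev < y := lt_of_le_of_ne (hlb y (List.mem_cons_self)) (fun h => hyp h.symm)
        have hnot : prev ∉ y :: t := by
          intro hmem
          rcases List.mem_cons.mp hmem with h | h
          · exact hyp h.symm
          · exact absurd (hy prev h) (not_le_of_gt hprevy)
        have hcnt : List.count prev (y :: t) = 0 := List.count_eq_zero.mpr hnot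
        have hfilt : (y :: t).filter (fun z => z ≠ prev) = y :: t := by
          refine List.filter_eq_self.mpr (fun z hz => ?_)
          have : prev < z := by
            rcases List.mem_cons.mp hz with h | h
            · exact h ▸ hprevy
            · exact lt_of_lt_of_le hprevy (hy z h)
          simp [ne_of_gt this]
        rw [runLengths, if_neg (fun h => hyp h), hcnt, hfilt]
        simp [runs]

-- runs of a sorted list are (as a multiset) the counts of its distinct elements
theorem runs_perm (s : List Int) (hs : s.Pairwise (· ≤ ·)) :
    (runs s).Perm ((PySem.Set.ofList s).map (fun k => ((List.count k s : Nat) : Int))) := by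
  induction hn : s.length using Nat.strong_induction_on generalizing s with
  | _ n ih =>
    match s, hn with
    | [], _ => simp [runs, PySem.Set.ofList]
    | x :: xs, hn =>
      rcases List.pairwise_cons.mp hs with ⟨hx, hxs⟩
      set F := xs.filter (fun y => y ≠ x) with hFdef
      have hrun : runs (x :: xs) = ((1 : Int) + (List.count x xs : Nat)) :: runs F := by
        rw [runs, runLengths_spec xs x 1 hxs hx]
      have hFlen : F.length < n := by
        subst hn
        exact lt_of_le_of_lt (List.length_filter_le _ _) (by simp)
      have hFsorted : F.Pairwise (· ≤ ·) := hxs.filter _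
      have ihF := ih F.length hFlen F hFsorted rfl
      -- distinct elements of x :: xs, as a set, are x plus those of F
      have hset : (PySem.Set.ofList (x :: xs)).Perm (x :: PySem.Set.ofList F) := by
        refine (List.perm_ext_iff_of_nodup (PySem.Set.nodup_ofList _) ?_).mpr (fun z => ?_)
        · refine List.nodup_cons.mpr ⟨fun hmem => ?_, PySem.Set.nodup_ofList _⟩
          have := (PySem.Set.mem_ofList F x).mp hmem
          simp [hFdef, List.mem_filter] at this
        · simp only [PySem.Set.mem_ofList, List.mem_cons, hFdef, List.mem_filter]
          constructor
          · rintro (h | h)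
            · exact Or.inl h
            · by_cases hz : z = x
              · exact Or.inl hz
              · exact Or.inr ⟨h, by simp [hz]⟩
          · rintro (h | ⟨h, _⟩)
            · exact Or.inl h
            · exact Or.inr h
      have hmap : ((PySem.Set.ofList (x :: xs)).map (fun k => ((List.count k (x :: xs) : Nat) : Int))).Perm
          (((List.count x (x :: xs) : Nat) : Int) :: (PySem.Set.ofList F).map (fun k => ((List.count k F : Nat) : Int))) := by
        have h1 := hset.map (fun k => ((List.count k (x :: xs) : Nat) : Int))
        rw [List.map_cons] at h1
        have h2 : (PySem.Set.ofList F).map (fun k => ((List.count k (x :: xs) : Nat) : Int))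
            = (PySem.Set.ofList F).map (fun k => ((List.count k F : Nat) : Int)) := by
          refine List.map_congr_left (fun k hk => ?_)
          have hkF : k ∈ F := (PySem.Set.mem_ofList F k).mp hk
          have hkx : (k ≠ x) := by
            have := List.mem_filter.mp (hFdef ▸ hkF)
            simpa using this.2
          have : List.count k (x :: xs) = List.count k F := by
            have hxk : ¬ (x = k) := fun h => hkx h.symm
            rw [hFdef, List.count_filter (by simp [hkx])]
            simp [hxk]
          rw [this]
        rw [h2] at h1
        exact h1
      refine List.Perm.trans ?_ hmap.symm
      rw [hrun, List.count_cons_self]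
      have hhd : ((List.count x xs + 1 : Nat) : Int) = 1 + ((List.count x xs : Nat) : Int) := by
        push_cast; ring
      rw [hhd]
      exact List.Perm.cons _ ihF

-- the max value is the same in permuted lists
theorem max_eq_of_perm {l1 l2 : List Int} (h : l1.Perm l2) {m1 m2 : Int}
    (h1 : PySem.List.max? l1 (fun y => y) = some m1)
    (h2 : PySem.List.max? l2 (fun y => y) = some m2) : m1 = m2 := by
  have hm1 : m1 ∈ l2 := h.mem_iff.mp (PySem.List.max?_mem h1)
  have hm2 : m2 ∈ l1 := h.mem_iff.mpr (PySem.List.max?_mem h2)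
  exact le_antisymm (PySem.List.max?_isMax h2 m1 hm1) (PySem.List.max?_isMax h1 m2 hm2)

-- ===== VERDICT (by name: the statement is the Claim_ definition above) =====
theorem solution_spec : Claim_equal_solution := by
  intro array _ hpre
  unfold Spec_solution solution solution_alt
  simp only []
  set C := (PySem.Set.ofList array).map (fun k => ((List.count k array : Nat) : Int)) with hC
  -- A's sorted count list
  rw [values_foldl_insert_count array]
  set cnts := PySem.List.sorted C (fun x => x) with hcnts
  have hcntsC : cnts.Perm C := PySem.List.sorted_perm C (fun x => x) false
  -- B's run lengths
  set s := PySem.List.sorted array (fun x => x) with hs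
  have hsperm : s.Perm array := PySem.List.sorted_perm array (fun x => x) false
  set lengths := runs s with hlen
  have hlensC : lengths.Perm C := by
    have h1 := runs_perm s (PySem.List.sorted_pairwise array (fun x => x))
    have hsetperm : (PySem.Set.ofList s).Perm (PySem.Set.ofList array) := by
      refine (List.perm_ext_iff_of_nodup (PySem.Set.nodup_ofList _) (PySem.Set.nodup_ofList _)).mpr (fun z => ?_)
      simp [PySem.Set.mem_ofList, hsperm.mem_iff]
    have hcount : ∀ k, List.count k s = List.count k array := fun k => hsperm.count_eq k
    have h2 : ((PySem.Set.ofList s).map (fun k => ((List.count k s : Nat) : Int))).Perm C := by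
      have := hsetperm.map (fun k => ((List.count k s : Nat) : Int))
      refine this.trans ?_
      rw [hC]
      exact List.Perm.of_eq (List.map_congr_left (fun k _ => by rw [hcount k]))
    exact h1.trans h2
  -- nonemptiness
  have hCne : C ≠ [] := by
    rcases List.exists_mem_of_ne_nil array hpre with ⟨a, ha⟩
    have : a ∈ PySem.Set.ofList array := (PySem.Set.mem_ofList array a).mpr ha
    rcases this with _
    intro hnil
    rw [hC] at hnil
    rcases List.map_eq_nil_iff.mp hnil with h
    simp [h] at this
  have hcntsne : cnts ≠ [] := fun h => hCne (List.Perm.eq_nil (h ▸ hcntsC).symm)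
  have hlensne : lengths ≠ [] := fun h => hCne (List.Perm.eq_nil (h ▸ hlensC).symm)
  -- the two maxima
  obtain ⟨m1, hm1⟩ : ∃ m, PySem.List.max? cnts (fun x => x) = some m := by
    cases h : PySem.List.max? cnts (fun x => x) with
    | none => exact absurd ((PySem.List.max?_eq_none_iff _ _).mp h) hcntsne
    | some m => exact ⟨m, rfl⟩
  obtain ⟨m2, hm2⟩ : ∃ m, PySem.List.max? lengths (fun y => y) = some m := by
    cases h : PySem.List.max? lengths (fun y => y) with
    | none => exact absurd ((PySem.List.max?_eq_none_iff _ _).mp h) hlensne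
    | some m => exact ⟨m, rfl⟩
  have hm12 : m1 = m2 := max_eq_of_perm (hcntsC.trans hlensC.symm) hm1 hm2
  have hccount : PySem.List.count cnts m1 = PySem.List.count lengths m2 := by
    rw [PySem.List.count_eq, PySem.List.count_eq, hm12, (hcntsC.trans hlensC.symm).count_eq]
  rw [hm1, hm2, Option.getD_some]
  show (if cnts.length = 1 then m1
    else if PySem.List.count cnts m1 > 1 then (-1 : Int) else m1)
      = if PySem.List.count lengths m2 > 1 then (-1 : Int) else m2
  by_cases hl1 : cnts.length = 1
  · -- a single distinct element: its count is the unique run length, no tie possible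
    rw [if_pos hl1]
    obtain ⟨c, hc⟩ := List.length_eq_one_iff.mp hl1
    have hm1c : m1 = c := by
      have := PySem.List.max?_mem hm1
      rw [hc] at this
      simpa using this
    have : PySem.List.count lengths m2 = 1 := by
      rw [← hccount, PySem.List.count_eq, hc, hm1c]
      simp
    rw [if_neg (by omega)]
    exact hm12
  · rw [if_neg hl1, hccount]
    by_cases hgt : PySem.List.count lengths m2 > 1
    · rw [if_pos hgt, if_pos hgt]
    · rw [if_neg hgt, if_neg hgt]
      exact hm12
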